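-- pv_equiv track=rewrite | github.com/dataforgoodfr/13_democratiser_sobriete | rag_system/backend/app/retrieval_policy.py | summarize_policy_impacts
-- ===== SOURCE A (Python) =====
-- from typing import Any
--
-- def summarize_policy_impacts(impacts: dict[str, Any]) -> tuple[list[str], list[str], int, int, int]:
--     """Collapse nested policy impacts into categories, dimensions, and sentiment totals."""
--     categories: list[str] = []
--     dimensions: list[str] = []
--     positive_count = 0
--     neutral_count = 0
--     negative_count = 0
--
--     for category, dimension_map in impacts.items():
--         categories.append(category)
--         if not isinstance(dimension_map, dict):
--             continue
--         for dimension, summaries in dimension_map.items():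
--             dimensions.append(f"{category}: {dimension}")
--             if not isinstance(summaries, list):
--                 summaries = [summaries]
--             for summary in summaries:
--                 if not isinstance(summary, dict):
--                     continue
--                 positive_count += int(summary.get("positive", 0) or 0)
--                 neutral_count += int(summary.get("neutral", 0) or 0)
--                 negative_count += int(summary.get("negative", 0) or 0)
--
--     return sorted(set(categories)), sorted(set(dimensions)), positive_count, neutral_count, negative_count
-- ===== SOURCE B (Python) =====
-- def summarize_policy_impacts(impacts):
--     """Collapse nested policy impacts into categories, dimensions, and sentiment totals."""
--     categories = sorted(set(impacts))
--     dimensions = sorted({f"{category}: {dimension}"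
--                          for category, dimension_map in impacts.items()
--                          if isinstance(dimension_map, dict)
--                          for dimension in dimension_map})
--
--     def summaries():
--         for dimension_map in impacts.values():
--             if not isinstance(dimension_map, dict):
--                 continue
--             for value in dimension_map.values():
--                 for summary in (value if isinstance(value, list) else [value]):
--                     if isinstance(summary, dict):
--                         yield summary
--
--     def total(key):
--         return sum(int(summary.get(key, 0) or 0) for summary in summaries())
--
--     return categories, dimensions, total("positive"), total("neutral"), total("negative")
-- ===== Notes on version B (the rewrite author's own statement) =====
-- stated objective: simpler
-- what changed: Replaces A's single interleaved triple-nested accumulation loop (five pieces of state threaded through one pass) with independent passes: categories straight from the keys, dimensions as a set comprehension, and the three sentiment totals as sum() over a flattened generator of summaries.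
import Mathlib
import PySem

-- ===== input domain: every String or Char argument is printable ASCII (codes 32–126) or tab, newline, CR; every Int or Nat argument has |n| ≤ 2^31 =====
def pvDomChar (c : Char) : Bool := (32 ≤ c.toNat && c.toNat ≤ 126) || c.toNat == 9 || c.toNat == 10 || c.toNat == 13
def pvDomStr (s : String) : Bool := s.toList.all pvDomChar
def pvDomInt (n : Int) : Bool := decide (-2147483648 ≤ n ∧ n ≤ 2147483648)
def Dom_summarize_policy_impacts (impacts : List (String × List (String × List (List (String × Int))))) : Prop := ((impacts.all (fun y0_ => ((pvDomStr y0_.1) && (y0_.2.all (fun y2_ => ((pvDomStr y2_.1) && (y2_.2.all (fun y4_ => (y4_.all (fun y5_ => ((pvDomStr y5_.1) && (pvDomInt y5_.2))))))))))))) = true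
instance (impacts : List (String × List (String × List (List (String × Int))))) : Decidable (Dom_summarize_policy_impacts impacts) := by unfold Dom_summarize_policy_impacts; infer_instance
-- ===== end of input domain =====

-- B computes the same result by independent passes (keys, set comprehension, three sums over a
-- flattened generator) instead of A's single loop threading five accumulators; same cost, simpler.
-- On the typed domain every dimension_map is a dict and every summaries value is a list of dicts,
-- so A's isinstance guards are always true and the non-list wrapping never fires; the ports omit them.

-- ===== PORT A =====
-- summary.get(key, 0): first-match lookup in the summary association list (int(x or 0) on an int is x)
def pvGetI (summary : List (String × Int)) (key : String) : Int :=
  PySem.Dict.getD (PySem.Dict.mk summary) key 0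

-- innermost loop: for summary in summaries: add the three counters (int(x or 0) on an int is x)
def pvStep3 (st : List String × List String × Int × Int × Int) (summary : List (String × Int)) :
    List String × List String × Int × Int × Int :=
  (st.1, st.2.1,
   st.2.2.1 + pvGetI summary "positive",
   st.2.2.2.1 + pvGetI summary "neutral",
   st.2.2.2.2 + pvGetI summary "negative")

-- middle loop: for dimension, summaries in dimension_map.items()
def pvStep2 (category : String) (st : List String × List String × Int × Int × Int)
    (ds : String × List (List (String × Int))) : List String × List String × Int × Int × Int :=
  ds.2.foldl pvStep3 (st.1, st.2.1 ++ [category ++ ": " ++ ds.1], st.2.2)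

-- outer loop: for category, dimension_map in impacts.items()
def pvStep1 (st : List String × List String × Int × Int × Int)
    (cd : String × List (String × List (List (String × Int)))) :
    List String × List String × Int × Int × Int :=
  cd.2.foldl (pvStep2 cd.1) (st.1 ++ [cd.1], st.2)

def summarize_policy_impacts (impacts : List (String × List (String × List (List (String × Int))))) : List String × List String × Int × Int × Int :=
  let st := impacts.foldl pvStep1 ([], [], 0, 0, 0)
  (PySem.List.sorted (PySem.Set.ofList st.1) (fun x => x) false,
   PySem.List.sorted (PySem.Set.ofList st.2.1) (fun x => x) false,
   st.2.2)

-- ===== PORT B =====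
-- the flattened generator of summaries
def pvSummaries (impacts : List (String × List (String × List (List (String × Int))))) :
    List (List (String × Int)) :=
  impacts.flatMap (fun cd => cd.2.flatMap (fun ds => ds.2))

-- total(key) = sum(int(summary.get(key, 0) or 0) for summary in summaries())
def pvTotal (impacts : List (String × List (String × List (List (String × Int))))) (key : String) : Int :=
  ((pvSummaries impacts).map (fun summary => pvGetI summary key)).sum

def summarize_policy_impacts_alt (impacts : List (String × List (String × List (List (String × Int))))) : List String × List String × Int × Int × Int :=
  (PySem.List.sorted (PySem.Set.ofList (impacts.map Prod.fst)) (fun x => x) false,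
   PySem.List.sorted (PySem.Set.ofList
     (impacts.flatMap (fun cd => cd.2.map (fun ds => cd.1 ++ ": " ++ ds.1)))) (fun x => x) false,
   pvTotal impacts "positive", pvTotal impacts "neutral", pvTotal impacts "negative")

-- ===== PRECONDITION & SPEC =====
def Spec_summarize_policy_impacts (impacts : List (String × List (String × List (List (String × Int))))) (out : List String × List String × Int × Int × Int) : Prop := out = summarize_policy_impacts_alt impacts
instance (impacts : List (String × List (String × List (List (String × Int))))) (out : List String × List String × Int × Int × Int) : Decidable (Spec_summarize_policy_impacts impacts out) := by unfold Spec_summarize_policy_impacts; infer_instance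

-- ===== CLAIM (what is proved, stated in full; the proofs are below) =====
def Claim_equal_summarize_policy_impacts : Prop := ∀ (impacts : List (String × List (String × List (List (String × Int))))), Dom_summarize_policy_impacts impacts → Spec_summarize_policy_impacts impacts (summarize_policy_impacts impacts)

-- ===== LEMMAS AND PROOFS =====
-- the innermost fold only adds the three per-key sums of the summary list
theorem pvFold3_eq (ss : List (List (String × Int))) (c d : List String) (p n g : Int) :
    ss.foldl pvStep3 (c, d, p, n, g) =
      (c, d,
       p + (ss.map (fun s => pvGetI s "positive")).sum,
       n + (ss.map (fun s => pvGetI s "neutral")).sum,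
       g + (ss.map (fun s => pvGetI s "negative")).sum) := by
  induction ss generalizing p n g with
  | nil => simp
  | cons s t ih => simp [pvStep3, ih]; refine ⟨by ring, by ring, by ring⟩

-- the middle fold appends the formatted dimensions and adds the sums over the flattened summaries
theorem pvFold2_eq (dm : List (String × List (List (String × Int)))) (cat : String)
    (c d : List String) (p n g : Int) :
    dm.foldl (pvStep2 cat) (c, d, p, n, g) =
      (c, d ++ dm.map (fun ds => cat ++ ": " ++ ds.1),
       p + ((dm.flatMap (fun ds => ds.2)).map (fun s => pvGetI s "positive")).sum,
       n + ((dm.flatMap (fun ds => ds.2)).map (fun s => pvGetI s "neutral")).sum,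
       g + ((dm.flatMap (fun ds => ds.2)).map (fun s => pvGetI s "negative")).sum) := by
  induction dm generalizing d p n g with
  | nil => simp
  | cons ds t ih =>
    simp [pvStep2, pvFold3_eq, ih]
    refine ⟨by ring, by ring, by ring⟩

-- the outer fold appends the keys and dimension strings and adds the global sums
theorem pvFold1_eq (impacts : List (String × List (String × List (List (String × Int)))))
    (c d : List String) (p n g : Int) :
    impacts.foldl pvStep1 (c, d, p, n, g) =
      (c ++ impacts.map Prod.fst,
       d ++ impacts.flatMap (fun cd => cd.2.map (fun ds => cd.1 ++ ": " ++ ds.1)),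
       p + ((pvSummaries impacts).map (fun s => pvGetI s "positive")).sum,
       n + ((pvSummaries impacts).map (fun s => pvGetI s "neutral")).sum,
       g + ((pvSummaries impacts).map (fun s => pvGetI s "negative")).sum) := by
  induction impacts generalizing c d p n g with
  | nil => simp [pvSummaries]
  | cons cd t ih =>
    simp [pvStep1, pvFold2_eq, ih, pvSummaries]
    refine ⟨by ring, by ring, by ring⟩

-- ===== VERDICT (by name: the statement is the Claim_ definition above) =====
theorem summarize_policy_impacts_spec : Claim_equal_summarize_policy_impacts := by
  intro impacts _
  show _ = _
  simp [summarize_policy_impacts, summarize_policy_impacts_alt, pvFold1_eq, pvTotal]
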